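-- pv_equiv track=rewrite | github.com/Flyrik/RechercheOP | Functions.py | isOpti
-- ===== SOURCE A (Python) =====
-- def isOpti(matriceMarg):
--     min = 10000000
--     x = 0
--     y = 0
--     Opti = True
--     for i in range(len(matriceMarg)):
--         for j in range(len(matriceMarg[i])):
--             if(matriceMarg[i][j] < 0 and matriceMarg[i][j] < min):
--                 min = matriceMarg[i][j]
--                 x = i
--                 y = j
--                 Opti = False
--     return Opti, x, y
-- ===== SOURCE B (Python) =====
-- def isOpti(matriceMarg):
--     # staged passes: (1) flatten, (2) global minimum, (3) locate its first
--     # row-major occurrence only if it is negative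
--     flat = [v for row in matriceMarg for v in row]
--     m = min(flat, default=0)
--     if m >= 0:
--         return True, 0, 0
--     for i, row in enumerate(matriceMarg):
--         if m in row:
--             return False, i, row.index(m)
--     return True, 0, 0  # not reached: m occurs in some row
-- ===== Notes on version B (the rewrite author's own statement) =====
-- stated objective: simpler
-- what changed: Replaces the single nested scan with mutable min/x/y/Opti state by three staged passes: flatten the matrix, take the global minimum with min(), and only if it is negative locate its first occurrence with a row membership test plus row.index(), which reproduces A's row-major first-occurrence tie-breaking.
import Mathlib
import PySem

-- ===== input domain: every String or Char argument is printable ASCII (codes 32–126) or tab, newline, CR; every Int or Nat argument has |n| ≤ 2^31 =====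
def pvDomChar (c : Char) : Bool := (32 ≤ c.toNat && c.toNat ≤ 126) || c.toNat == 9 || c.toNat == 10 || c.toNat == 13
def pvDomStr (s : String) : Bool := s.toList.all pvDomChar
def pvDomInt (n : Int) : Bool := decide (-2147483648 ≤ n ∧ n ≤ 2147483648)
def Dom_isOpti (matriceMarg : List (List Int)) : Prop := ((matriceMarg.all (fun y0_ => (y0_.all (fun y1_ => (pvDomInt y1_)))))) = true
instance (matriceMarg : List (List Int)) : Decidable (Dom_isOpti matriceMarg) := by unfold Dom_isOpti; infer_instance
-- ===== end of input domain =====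

-- B replaces A's single nested scan with mutable min/x/y/Opti state by staged passes:
-- flatten, take the global minimum with min(), and only if it is negative locate its
-- first row-major occurrence with a membership test plus row.index().


-- ===== PORT A =====
-- state (min, x, y, Opti); nested for-loops over range(len(...)) with indexing
def isOpti (matriceMarg : List (List Int)) : Bool × Int × Int :=
  let st :=
    (PySem.List.pyRange 0 (PySem.List.len matriceMarg) 1).foldl
      (fun (s : Int × Int × Int × Bool) i =>
        let row := PySem.List.pyGetD matriceMarg i []
        (PySem.List.pyRange 0 (PySem.List.len row) 1).foldl
          (fun (s : Int × Int × Int × Bool) j =>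
            let v := PySem.List.pyGetD row j 0
            if v < 0 ∧ v < s.1 then (v, i, j, false) else s)
          s)
      ((10000000 : Int), (0 : Int), (0 : Int), true)
  (st.2.2.2, st.2.1, st.2.2.1)

-- ===== PORT B =====
-- the 'for i, row in enumerate(...): if m in row: return False, i, row.index(m)' loop;
-- row.index is guarded by 'm in row', so the .getD 0 default is never the error case
def findRow : List (List Int) → Int → Int → Bool × Int × Int
  | [], _, _ => (true, 0, 0)
  | row :: rest, m, i =>
    if row.contains m then (false, i, (((PySem.List.index? row m).getD 0 : Nat) : Int))
    else findRow rest m (i + 1)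

def isOpti_alt (matriceMarg : List (List Int)) : Bool × Int × Int :=
  let flat := matriceMarg.flatMap id
  let m := PySem.List.minD flat (fun v => v) 0
  if 0 ≤ m then (true, 0, 0) else findRow matriceMarg m 0

-- ===== PRECONDITION & SPEC =====
def Spec_isOpti (matriceMarg : List (List Int)) (out : Bool × Int × Int) : Prop := out = isOpti_alt matriceMarg
instance (matriceMarg : List (List Int)) (out : Bool × Int × Int) : Decidable (Spec_isOpti matriceMarg out) := by unfold Spec_isOpti; infer_instance

-- ===== CLAIM (what is proved, stated in full; the proofs are below) =====
def Claim_equal_isOpti : Prop := ∀ (matriceMarg : List (List Int)), Dom_isOpti matriceMarg → Spec_isOpti matriceMarg (isOpti matriceMarg)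

-- ===== LEMMAS AND PROOFS =====

-- lexicographic '<' on (v, i, j) triples
def tupLtB (a b : Int × Int × Int) : Bool :=
  decide (a.1 < b.1) ||
    (decide (a.1 = b.1) &&
      (decide (a.2.1 < b.2.1) || (decide (a.2.1 = b.2.1) && decide (a.2.2 < b.2.2))))

-- row-major index order on (v, i, j) cells
def idxLt (a b : Int × Int × Int) : Prop :=
  a.2.1 < b.2.1 ∨ (a.2.1 = b.2.1 ∧ a.2.2 < b.2.2)

-- the row-major cell list (v, i, j), rows numbered from k
def cellsFrom (k : Int) (matriceMarg : List (List Int)) : List (Int × Int × Int) :=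
  (PySem.List.enumerate matriceMarg k).flatMap (fun p =>
    (PySem.List.enumerate p.2 0).map (fun q => (q.2, p.1, q.1)))

-- A's update step, and its negatives-only version
def stepA (s : Int × Int × Int × Bool) (t : Int × Int × Int) : Int × Int × Int × Bool :=
  if t.1 < 0 ∧ t.1 < s.1 then (t.1, t.2.1, t.2.2, false) else s

def stepN (s : Int × Int × Int × Bool) (t : Int × Int × Int) : Int × Int × Int × Bool :=
  if t.1 < s.1 then (t.1, t.2.1, t.2.2, false) else s

-- running lexicographic minimum
def minTup (c : Int × Int × Int) (rest : List (Int × Int × Int)) : Int × Int × Int :=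
  rest.foldl (fun acc t => if tupLtB t acc then t else acc) c

lemma cellsFrom_cons (k : Int) (row : List Int) (rest : List (List Int)) :
    cellsFrom k (row :: rest)
      = (PySem.List.enumerate row 0).map (fun q => (q.2, k, q.1)) ++ cellsFrom (k + 1) rest := by
  unfold cellsFrom
  rw [PySem.List.enumerate_cons, List.flatMap_cons]

lemma mem_rowcells (row : List Int) (k : Int) (t : Int × Int × Int) :
    t ∈ (PySem.List.enumerate row 0).map (fun q => (q.2, k, q.1))
      ↔ ∃ (j : Nat) (hj : j < row.length), t = (row[j], k, (j : Int)) := by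
  simp only [List.mem_map, PySem.List.mem_enumerate_iff]
  constructor
  · rintro ⟨q, ⟨j, hj, rfl⟩, rfl⟩
    exact ⟨j, hj, by simp⟩
  · rintro ⟨j, hj, rfl⟩
    exact ⟨((j : Int), row[j]), ⟨j, hj, by simp⟩, rfl⟩

lemma cellsFrom_first_ge (M : List (List Int)) :
    ∀ (k : Int) (t : Int × Int × Int), t ∈ cellsFrom k M → k ≤ t.2.1 := by
  induction M with
  | nil => intro k t ht; simp [cellsFrom] at ht
  | cons row rest ih =>
    intro k t ht
    rw [cellsFrom_cons, List.mem_append] at ht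
    rcases ht with h | h
    · obtain ⟨j, hj, rfl⟩ := (mem_rowcells row k t).mp h
      simp
    · have := ih (k + 1) t h
      omega

-- ≤-transitivity of the lexicographic order, in the two shapes the minimum argument needs
lemma tupLtB_le_trans (a b c : Int × Int × Int) (h1 : tupLtB b a = false)
    (h2 : tupLtB c b = false) : tupLtB c a = false := by
  obtain ⟨a1, a2, a3⟩ := a; obtain ⟨b1, b2, b3⟩ := b; obtain ⟨c1, c2, c3⟩ := c
  simp only [tupLtB, Bool.or_eq_false_iff, Bool.and_eq_false_iff,
    decide_eq_false_iff_not, not_lt] at h1 h2 ⊢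
  omega

lemma tupLtB_lt_le (a b c : Int × Int × Int) (h1 : tupLtB b c = true)
    (h2 : tupLtB b a = false) : tupLtB c a = false := by
  obtain ⟨a1, a2, a3⟩ := a; obtain ⟨b1, b2, b3⟩ := b; obtain ⟨c1, c2, c3⟩ := c
  simp only [tupLtB, Bool.or_eq_false_iff, Bool.and_eq_false_iff,
    decide_eq_false_iff_not, not_lt, Bool.or_eq_true, Bool.and_eq_true,
    decide_eq_true_eq] at h1 h2 ⊢
  omega

lemma minTup_mem (rest : List (Int × Int × Int)) :
    ∀ c, minTup c rest ∈ c :: rest := by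
  induction rest with
  | nil => intro c; simp [minTup]
  | cons t rest ih =>
    intro c
    have hstep : minTup c (t :: rest) = minTup (if tupLtB t c then t else c) rest := by
      simp [minTup]
    rw [hstep]
    rcases List.mem_cons.mp (ih (if tupLtB t c then t else c)) with h | h
    · rw [h]
      by_cases ht : tupLtB t c <;> simp [ht]
    · simp [h]

lemma minTup_not_lt (rest : List (Int × Int × Int)) :
    ∀ c x, x ∈ c :: rest → tupLtB x (minTup c rest) = false := by
  induction rest with
  | nil =>
    intro c x hx
    rcases List.mem_cons.mp hx with rfl | h
    · obtain ⟨a1, a2, a3⟩ := x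
      simp [minTup, tupLtB]
    · simp at h
  | cons t rest ih =>
    intro c x hx
    have hstep : minTup c (t :: rest) = minTup (if tupLtB t c then t else c) rest := by
      simp [minTup]
    rw [hstep]
    by_cases ht : tupLtB t c
    · rw [if_pos ht]
      rcases List.mem_cons.mp hx with h | hx'
      · rw [h]
        exact tupLtB_lt_le _ t _ ht (ih t t List.mem_cons_self)
      · exact ih t x hx'
    · rw [if_neg ht]
      rcases List.mem_cons.mp hx with h | hx'
      · rw [h]
        exact ih c c List.mem_cons_self
      · rcases List.mem_cons.mp hx' with h2 | hx''
        · rw [h2]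
          exact tupLtB_le_trans _ c _ (ih c c List.mem_cons_self)
            (Bool.eq_false_iff.mpr ht)
        · exact ih c x (List.mem_cons_of_mem _ hx'')

-- Stage A1: A's nested range/index fold is the stepA fold over the row-major cells
lemma isOpti_eq_foldl_cells (M : List (List Int)) :
    isOpti M = (((cellsFrom 0 M).foldl stepA (10000000, 0, 0, true)).2.2.2,
                ((cellsFrom 0 M).foldl stepA (10000000, 0, 0, true)).2.1,
                ((cellsFrom 0 M).foldl stepA (10000000, 0, 0, true)).2.2.1) := by
  have key : (PySem.List.pyRange 0 (PySem.List.len M) 1).foldl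
      (fun (s : Int × Int × Int × Bool) i =>
        let row := PySem.List.pyGetD M i []
        (PySem.List.pyRange 0 (PySem.List.len row) 1).foldl
          (fun (s : Int × Int × Int × Bool) j =>
            let v := PySem.List.pyGetD row j 0
            if v < 0 ∧ v < s.1 then (v, i, j, false) else s)
          s)
      ((10000000 : Int), (0 : Int), (0 : Int), true)
      = (cellsFrom 0 M).foldl stepA (10000000, 0, 0, true) := by
    unfold cellsFrom
    rw [List.foldl_flatMap]
    rw [PySem.List.enumerate_eq_map_pyRange M ([] : List Int), List.foldl_map]
    apply PySem.List.foldl_congr_mem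
    intro acc i _
    rw [List.foldl_map,
        PySem.List.enumerate_eq_map_pyRange (PySem.List.pyGetD M i []) (0 : Int),
        List.foldl_map]
    rfl
  simp only [isOpti, key]

-- the cells are strictly increasing in (i, j)
lemma cells_pairwise (M : List (List Int)) : (cellsFrom 0 M).Pairwise idxLt := by
  unfold cellsFrom
  rw [List.pairwise_flatMap]
  constructor
  · intro p _
    rw [List.pairwise_map]
    exact (PySem.List.pairwise_lt_enumerate p.2 0).imp (fun h => Or.inr ⟨rfl, h⟩)
  · refine (PySem.List.pairwise_lt_enumerate M 0).imp ?_
    intro p q hpq x hx y hy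
    simp only [List.mem_map] at hx hy
    obtain ⟨a, _, rfl⟩ := hx
    obtain ⟨b, _, rfl⟩ := hy
    exact Or.inl hpq

-- Stage A2: over an index-sorted tail, A's strict-min update fold computes the
-- lexicographic minimum tuple (tie on the value is broken by the earlier index)
lemma foldl_stepN_eq_minTup (rest : List (Int × Int × Int)) :
    ∀ c, (c :: rest).Pairwise idxLt →
      rest.foldl stepN (c.1, c.2.1, c.2.2, false)
        = ((minTup c rest).1, (minTup c rest).2.1, (minTup c rest).2.2, false) := by
  induction rest with
  | nil => intro c _; simp [minTup]
  | cons t rest ih =>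
    intro c hp
    have hct : idxLt c t := (List.pairwise_cons.mp hp).1 t (List.mem_cons_self)
    have hcr : ∀ y ∈ rest, idxLt c y :=
      fun y hy => (List.pairwise_cons.mp hp).1 y (List.mem_cons_of_mem _ hy)
    have htr := (List.pairwise_cons.mp hp).2
    have hiff : tupLtB t c = decide (t.1 < c.1) := by
      unfold idxLt at hct
      by_cases hv : t.1 < c.1
      · simp [tupLtB, hv]
      · simp only [tupLtB, hv, decide_false, Bool.false_or, Bool.and_eq_false_iff,
          Bool.or_eq_false_iff, decide_eq_false_iff_not, not_lt]
        omega
    have hstep : stepN (c.1, c.2.1, c.2.2, false) t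
        = ((if tupLtB t c then t else c).1, (if tupLtB t c then t else c).2.1,
           (if tupLtB t c then t else c).2.2, false) := by
      by_cases h : t.1 < c.1
      · rw [if_pos (by simp [hiff, h])]
        simp [stepN, h]
      · rw [if_neg (by simp [hiff, h])]
        simp [stepN, h]
    rw [List.foldl_cons, hstep]
    have hnext : ((if tupLtB t c then t else c) :: rest).Pairwise idxLt := by
      rw [List.pairwise_cons]
      refine ⟨?_, (List.pairwise_cons.mp htr).2⟩
      intro y hy
      by_cases h : tupLtB t c
      · rw [if_pos h]
        exact (List.pairwise_cons.mp htr).1 y hy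
      · rw [if_neg h]
        exact hcr y hy
    have := ih (if tupLtB t c then t else c) hnext
    simpa [minTup] using this

-- Stage A3: A's result, by cases on the list of negative cells
lemma isOpti_cases (M : List (List Int)) :
    isOpti M = match (cellsFrom 0 M).filter (fun t => decide (t.1 < 0)) with
      | [] => (true, 0, 0)
      | c :: rest => (false, (minTup c rest).2.1, (minTup c rest).2.2) := by
  rw [isOpti_eq_foldl_cells]
  have hstep : ∀ (s : Int × Int × Int × Bool) (t : Int × Int × Int),
      stepA s t = if t.1 < 0 then stepN s t else s := by
    intro s t
    unfold stepA stepN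
    by_cases h1 : t.1 < 0 <;> by_cases h2 : t.1 < s.1 <;> simp [h1, h2]
  have hfold : (cellsFrom 0 M).foldl stepA (10000000, 0, 0, true)
      = ((cellsFrom 0 M).filter (fun t => decide (t.1 < 0))).foldl stepN (10000000, 0, 0, true) := by
    rw [PySem.List.foldl_congr_mem (cellsFrom 0 M) stepA
        (fun s t => if t.1 < 0 then stepN s t else s) (10000000, 0, 0, true)
        (fun acc x _ => hstep acc x)]
    exact PySem.List.foldl_ite_eq_foldl_filter (fun t : Int × Int × Int => t.1 < 0)
      stepN (cellsFrom 0 M) (10000000, 0, 0, true)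
  have hpw : ((cellsFrom 0 M).filter (fun t => decide (t.1 < 0))).Pairwise idxLt :=
    (cells_pairwise M).filter _
  rw [hfold]
  cases hn : (cellsFrom 0 M).filter (fun t => decide (t.1 < 0)) with
  | nil => simp
  | cons c rest =>
    have hcneg : c.1 < 0 := by
      have hmem : c ∈ (cellsFrom 0 M).filter (fun t => decide (t.1 < 0)) := by
        rw [hn]; exact List.mem_cons_self
      simpa using (List.mem_filter.mp hmem).2
    have h1 : stepN (10000000, 0, 0, true) c = (c.1, c.2.1, c.2.2, false) := by
      unfold stepN; rw [if_pos (by omega)]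
    rw [hn] at hpw
    simp only [List.foldl_cons, h1, foldl_stepN_eq_minTup rest c hpw]

-- Stage B1: values of the cells are exactly the flattened entries
lemma mem_flat_iff (M : List (List Int)) :
    ∀ (k v : Int), (∃ t ∈ cellsFrom k M, t.1 = v) ↔ v ∈ M.flatMap id := by
  induction M with
  | nil => intro k v; simp [cellsFrom]
  | cons row rest ih =>
    intro k v
    rw [List.flatMap_cons, List.mem_append]
    constructor
    · rintro ⟨t, ht, rfl⟩
      rw [cellsFrom_cons, List.mem_append] at ht
      rcases ht with h | h
      · obtain ⟨j, hj, rfl⟩ := (mem_rowcells row k t).mp h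
        exact Or.inl (by simp [List.getElem_mem hj])
      · exact Or.inr ((ih (k + 1) t.1).mp ⟨t, h, rfl⟩)
    · rintro (h | h)
      · obtain ⟨j, hj, hv⟩ := List.mem_iff_getElem.mp (by simpa using h)
        refine ⟨(row[j], k, (j : Int)), ?_, hv⟩
        rw [cellsFrom_cons, List.mem_append]
        exact Or.inl ((mem_rowcells row k _).mpr ⟨j, hj, rfl⟩)
      · obtain ⟨t, ht, rfl⟩ := (ih (k + 1) v).mpr h
        refine ⟨t, ?_, rfl⟩
        rw [cellsFrom_cons, List.mem_append]
        exact Or.inr ht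

-- Stage B2: B's locate loop returns the row-major lexicographic minimum cell
lemma findRow_spec (M : List (List Int)) :
    ∀ (k : Int) (m : Int × Int × Int),
      m ∈ (cellsFrom k M).filter (fun t => decide (t.1 < 0)) →
      (∀ t ∈ (cellsFrom k M).filter (fun t => decide (t.1 < 0)), tupLtB t m = false) →
      findRow M m.1 k = (false, m.2.1, m.2.2) := by
  induction M with
  | nil => intro k m hm _; simp [cellsFrom] at hm
  | cons row rest ih =>
    intro k m hm hmin
    rw [cellsFrom_cons, List.filter_append] at hm hmin
    have hmneg : m.1 < 0 := by
      rcases List.mem_append.mp hm with h | h <;> simpa using (List.mem_filter.mp h).2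
    by_cases hc : row.contains m.1
    · have hmrow : m.1 ∈ row := List.contains_iff_mem.mp hc
      obtain ⟨j0, hj0⟩ := Option.isSome_iff_exists.mp
        ((PySem.List.index?_isSome_iff row m.1).mpr hmrow)
      obtain ⟨hk0, hrow0, hfirst⟩ := PySem.List.getElem_of_index?_eq_some hj0
      have ht0 : ((m.1, k, (j0 : Int)) : Int × Int × Int)
          ∈ (PySem.List.enumerate row 0).map (fun q => (q.2, k, q.1)) :=
        (mem_rowcells row k _).mpr ⟨j0, hk0, by rw [hrow0]⟩
      have hnt0 : tupLtB (m.1, k, (j0 : Int)) m = false :=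
        hmin _ (List.mem_append.mpr (Or.inl (List.mem_filter.mpr ⟨ht0, by simpa using hmneg⟩)))
      rcases List.mem_append.mp hm with hL | hR
      · obtain ⟨j, hj, hmeq⟩ := (mem_rowcells row k m).mp (List.mem_filter.mp hL).1
        subst hmeq
        simp [tupLtB, not_lt] at hnt0
        have hjge : j0 ≤ j := by
          by_contra hlt
          exact hfirst j (by omega) rfl
        have hje : j = j0 := by omega
        simp only [findRow]
        rw [if_pos hc, hj0]
        simp [hje]
      · exfalso
        have hge : k + 1 ≤ m.2.1 :=
          cellsFrom_first_ge rest (k + 1) m (List.mem_filter.mp hR).1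
        simp [tupLtB, not_lt] at hnt0
        omega
    · have hR : m ∈ (cellsFrom (k + 1) rest).filter (fun t => decide (t.1 < 0)) := by
        rcases List.mem_append.mp hm with hL | hR
        · exfalso
          obtain ⟨j, hj, hmeq⟩ := (mem_rowcells row k m).mp (List.mem_filter.mp hL).1
          exact hc (List.contains_iff_mem.mpr (by rw [hmeq]; exact List.getElem_mem hj))
        · exact hR
      have hc' : m.1 ∉ row := fun hmem => hc (List.contains_iff_mem.mpr hmem)
      have := ih (k + 1) m hR (fun t ht => hmin t (List.mem_append.mpr (Or.inr ht)))
      simpa [findRow, hc'] using this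

-- Stage B3: B's result, by cases on the same list of negative cells
lemma isOpti_alt_cases (M : List (List Int)) :
    isOpti_alt M = match (cellsFrom 0 M).filter (fun t => decide (t.1 < 0)) with
      | [] => (true, 0, 0)
      | c :: rest => (false, (minTup c rest).2.1, (minTup c rest).2.2) := by
  have halt : isOpti_alt M
      = if 0 ≤ PySem.List.minD (M.flatMap id) (fun v => v) 0 then ((true, 0, 0) : Bool × Int × Int)
        else findRow M (PySem.List.minD (M.flatMap id) (fun v => v) 0) 0 := rfl
  have hmd : PySem.List.minD (M.flatMap id) (fun v => v) 0
      = (PySem.List.min? (M.flatMap id) (fun v => v)).getD 0 := rfl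
  cases hn : (cellsFrom 0 M).filter (fun t => decide (t.1 < 0)) with
  | nil =>
    have hpos : ∀ v ∈ M.flatMap id, 0 ≤ v := by
      intro v hv
      obtain ⟨t, ht, rfl⟩ := (mem_flat_iff M 0 v).mpr hv
      by_contra hneg
      have hmem : t ∈ (cellsFrom 0 M).filter (fun t => decide (t.1 < 0)) :=
        List.mem_filter.mpr ⟨ht, by simpa using (by omega : t.1 < 0)⟩
      rw [hn] at hmem
      simp at hmem
    have h0 : 0 ≤ PySem.List.minD (M.flatMap id) (fun v => v) 0 := by
      rw [hmd]
      cases hmin : PySem.List.min? (M.flatMap id) (fun v => v) with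
      | none => simp
      | some m0 => simpa using hpos m0 (PySem.List.min?_mem hmin)
    rw [halt, if_pos h0]
  | cons c rest =>
    have hmem : minTup c rest ∈ (cellsFrom 0 M).filter (fun t => decide (t.1 < 0)) := by
      rw [hn]; exact minTup_mem rest c
    obtain ⟨hmc, hmneg'⟩ := List.mem_filter.mp hmem
    have hmneg : (minTup c rest).1 < 0 := by simpa using hmneg'
    have hmflat : (minTup c rest).1 ∈ M.flatMap id :=
      (mem_flat_iff M 0 (minTup c rest).1).mp ⟨minTup c rest, hmc, rfl⟩
    cases hmin : PySem.List.min? (M.flatMap id) (fun v => v) with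
    | none =>
      exact absurd hmflat (by
        rw [(PySem.List.min?_eq_none_iff (M.flatMap id) (fun v => v)).mp hmin]
        simp)
    | some m0 =>
      have hle : m0 ≤ (minTup c rest).1 := PySem.List.min?_isMin hmin _ hmflat
      obtain ⟨t, ht, ht1⟩ := (mem_flat_iff M 0 m0).mpr (PySem.List.min?_mem hmin)
      have htfil : t ∈ (cellsFrom 0 M).filter (fun t => decide (t.1 < 0)) :=
        List.mem_filter.mpr ⟨ht, by simpa using (by omega : t.1 < 0)⟩
      have hnlt : tupLtB t (minTup c rest) = false := by
        rw [hn] at htfil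
        exact minTup_not_lt rest c t htfil
      have hge : (minTup c rest).1 ≤ t.1 := by
        simp only [tupLtB, Bool.or_eq_false_iff, Bool.and_eq_false_iff,
          decide_eq_false_iff_not, not_lt] at hnlt
        exact hnlt.1
      have heq : PySem.List.minD (M.flatMap id) (fun v => v) 0 = (minTup c rest).1 := by
        rw [hmd, hmin]
        simp only [Option.getD_some]
        omega
      rw [halt, if_neg (by omega), heq]
      exact findRow_spec M 0 (minTup c rest) hmem (fun t ht => by
        rw [hn] at ht
        exact minTup_not_lt rest c t ht)

-- ===== VERDICT (by name: the statement is the Claim_ definition above) =====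
theorem isOpti_spec : Claim_equal_isOpti := by
  intro M _
  unfold Spec_isOpti
  rw [isOpti_cases, isOpti_alt_cases]
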